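-- pv_equiv track=rewrite | github.com/jdav892/DailySolutions | running_out_of_space.py | spacey
-- ===== SOURCE A (Python) =====
-- def spacey(array):
--     space = []
--     combo = ""
--     for word in array:
--         combo += word
--         space.append(combo)
--     return space
--
--     """
--     from itertool import accumulate
--     def spacey(array):
--     return list(accumulate(array))
--     """
-- ===== SOURCE B (Python) =====
-- def spacey(array):
--     return [''.join(array[:i + 1]) for i in range(len(array))]
-- ===== Notes on version B (the rewrite author's own statement) =====
-- stated objective: alternative
-- what changed: Replaces the running-accumulator loop with a comprehension that recomputes each prefix independently as ''.join(array[:i+1]).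
import Mathlib
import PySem

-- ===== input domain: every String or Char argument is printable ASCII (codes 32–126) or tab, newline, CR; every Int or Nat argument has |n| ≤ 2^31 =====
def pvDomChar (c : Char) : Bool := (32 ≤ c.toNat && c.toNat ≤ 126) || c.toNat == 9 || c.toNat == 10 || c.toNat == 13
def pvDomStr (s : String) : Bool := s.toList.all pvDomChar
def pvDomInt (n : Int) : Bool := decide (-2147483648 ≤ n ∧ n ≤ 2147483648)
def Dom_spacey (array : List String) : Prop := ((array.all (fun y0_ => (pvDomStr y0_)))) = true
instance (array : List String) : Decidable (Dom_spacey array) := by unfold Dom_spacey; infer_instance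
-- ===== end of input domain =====

-- ===== PORT A =====
-- A: running concatenation accumulator loop
def spacey (array : List String) : List String :=
  (array.foldl (fun (st : List String × String) word =>
    let combo := st.2 ++ word
    (st.1 ++ [combo], combo)) ([], "")).1

-- ===== PORT B =====
-- B: each prefix recomputed independently by joining a slice
def spacey_alt (array : List String) : List String :=
  (List.range array.length).map (fun i => String.join (array.take (i + 1)))

-- ===== PRECONDITION & SPEC =====
def Spec_spacey (array : List String) (out : List String) : Prop := out = spacey_alt array
instance (array : List String) (out : List String) : Decidable (Spec_spacey array out) := by unfold Spec_spacey; infer_instance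

-- ===== CLAIM (what is proved, stated in full; the proofs are below) =====
def Claim_equal_spacey : Prop := ∀ (array : List String), Dom_spacey array → Spec_spacey array (spacey array)

-- ===== LEMMAS AND PROOFS =====

-- ===== VERDICT (by name: the statement is the Claim_ definition above) =====
theorem str_foldl_append (l : List String) (w : String) :
    List.foldl (fun r s => r ++ s) w l = w ++ List.foldl (fun r s => r ++ s) "" l := by
  induction l generalizing w with
  | nil => simp
  | cons a t ih => rw [List.foldl_cons, List.foldl_cons, ih, ih ("" ++ a)]; simp [String.append_assoc]

theorem spacey_foldl (l : List String) (acc : List String) (c : String) :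
    (l.foldl (fun (st : List String × String) word =>
      let combo := st.2 ++ word
      (st.1 ++ [combo], combo)) (acc, c)).1
    = acc ++ (List.range l.length).map (fun i => c ++ String.join (l.take (i + 1))) := by
  induction l generalizing acc c with
  | nil => simp
  | cons w t ih =>
      simp only [List.foldl_cons, ih, List.length_cons, List.range_succ_eq_map, List.map_cons,
        List.map_map, List.take_succ_cons, String.join, List.foldl_cons]
      simp [List.append_assoc, String.append_assoc]
      intro a _
      exact (str_foldl_append _ w).symm

theorem spacey_spec : Claim_equal_spacey := by
  intro array _
  unfold Spec_spacey spacey spacey_alt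
  rw [spacey_foldl]
  simp
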